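-- pv_equiv track=rewrite | github.com/daniel-gonzalez-cedre/school | fsu/monte-carlo-methods/goodness-of-fit/code/run-test.py | run_ups
-- ===== SOURCE A (Python) =====
-- def run_ups(seq):
--     length = 1
--     u1, u2, u3, u4 = (0, 0, 0, 0)
--     prev = seq[0]
--     for u in seq[1:]:
--         if prev <= u:
--             length += 1
--         else:
--             if length == 1:
--                 u1 += 1
--             elif length == 2:
--                 u2 += 1
--             elif length == 3:
--                 u3 += 1
--             else:
--                 u4 += 1
--             length = 1
--         prev = u
--     if length == 1:
--         u1 += 1
--     elif length == 2:
--         u2 += 1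
--     elif length == 3:
--         u3 += 1
--     else:
--         u4 += 1
--     return u1, u2, u3, u4
-- ===== SOURCE B (Python) =====
-- def run_ups(seq):
--     n = len(seq)
--     # a run starts at index i iff i == 0 or there is a descent just before it
--     starts = [i for i in range(n) if i == 0 or seq[i - 1] > seq[i]]
--     counts = [0, 0, 0, 0]
--     for s, e in zip(starts, starts[1:] + [n]):
--         counts[min(e - s, 4) - 1] += 1
--     return tuple(counts)
-- ===== Notes on version B (the rewrite author's own statement) =====
-- stated objective: alternative
-- what changed: B has no running-length state machine: it builds the list of run-start indices with a comprehension (i==0 or a descent just before i), zips each start with the next one (or n) and buckets the index differences min(e-s,4)-1; A threads a length accumulator through one scan with an if/elif chain duplicated inside and after the loop.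
import Mathlib
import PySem

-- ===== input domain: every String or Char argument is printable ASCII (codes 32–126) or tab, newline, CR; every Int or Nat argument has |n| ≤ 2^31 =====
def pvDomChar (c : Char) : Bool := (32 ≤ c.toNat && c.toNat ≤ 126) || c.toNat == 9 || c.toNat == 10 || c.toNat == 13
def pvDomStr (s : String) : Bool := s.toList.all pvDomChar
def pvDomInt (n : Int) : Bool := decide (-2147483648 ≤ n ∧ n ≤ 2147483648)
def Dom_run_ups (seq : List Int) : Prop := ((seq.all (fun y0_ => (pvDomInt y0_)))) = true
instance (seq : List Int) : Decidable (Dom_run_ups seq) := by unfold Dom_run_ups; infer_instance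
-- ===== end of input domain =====

-- B drops A's running-length state machine: it lists the run-start indices by a
-- comprehension (i == 0 or a descent just before i), zips each start with the next
-- start (or n), and buckets the index differences.  Same cost, different algorithm.
-- Return value only: neither version mutates its argument.

-- ===== PORT A =====
-- state: (length, u1, u2, u3, u4, prev), the loop over seq[1:]
def run_ups_loop : List Int → Int × Int × Int × Int × Int × Int → Int × Int × Int × Int × Int × Int
  | [], st => st
  | u :: rest, (length, u1, u2, u3, u4, prev) =>
    run_ups_loop rest
      (if prev ≤ u then (length + 1, u1, u2, u3, u4, u)
       else if length == 1 then (1, u1 + 1, u2, u3, u4, u)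
       else if length == 2 then (1, u1, u2 + 1, u3, u4, u)
       else if length == 3 then (1, u1, u2, u3 + 1, u4, u)
       else (1, u1, u2, u3, u4 + 1, u))

def run_ups (seq : List Int) : Int × Int × Int × Int :=
  match seq with
  | [] => (0, 0, 0, 0)  -- Python raises IndexError reading seq[0]; excluded by Pre_run_ups
  | h :: t =>
    match run_ups_loop t (1, 0, 0, 0, 0, h) with
    | (length, u1, u2, u3, u4, _) =>
      if length == 1 then (u1 + 1, u2, u3, u4)
      else if length == 2 then (u1, u2 + 1, u3, u4)
      else if length == 3 then (u1, u2, u3 + 1, u4)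
      else (u1, u2, u3, u4 + 1)

-- ===== PORT B =====
-- the comprehension [i for i in range(n) if i == 0 or seq[i-1] > seq[i]]
-- (both indices are in range for every kept i, so getD is exact)
def bStarts (seq : List Int) : List Nat :=
  (List.range seq.length).filter
    (fun i => i == 0 || decide (seq.getD (i - 1) 0 > seq.getD i 0))

-- loop body: counts[min(e - s, 4) - 1] += 1 (index always 0..3: e - s ≥ 1)
def bucketStepN (c : List Int) (p : Nat × Nat) : List Int :=
  c.set (min (p.2 - p.1) 4 - 1) (c.getD (min (p.2 - p.1) 4 - 1) 0 + 1)

def run_ups_alt (seq : List Int) : Int × Int × Int × Int :=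
  let starts := bStarts seq
  let counts := (starts.zip (starts.tail ++ [seq.length])).foldl bucketStepN [0, 0, 0, 0]
  (counts.getD 0 0, counts.getD 1 0, counts.getD 2 0, counts.getD 3 0)

-- ===== PRECONDITION & SPEC =====
-- Python A reads the first element and raises IndexError on the empty list; Pre_ excludes exactly that.
def Pre_run_ups (seq : List Int) : Prop := seq ≠ []
instance (seq : List Int) : Decidable (Pre_run_ups seq) := by unfold Pre_run_ups; infer_instance
def pvWitness_run_ups : List Int := [1, 2, 2, 1, 5, 0, 0]

def Spec_run_ups (seq : List Int) (out : Int × Int × Int × Int) : Prop := out = run_ups_alt seq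
instance (seq : List Int) (out : Int × Int × Int × Int) : Decidable (Spec_run_ups seq out) := by unfold Spec_run_ups; infer_instance

-- ===== CLAIM (what is proved, stated in full; the proofs are below) =====
def Claim_equal_run_ups : Prop := ∀ (seq : List Int), Dom_run_ups seq → Pre_run_ups seq → Spec_run_ups seq (run_ups seq)

-- ===== LEMMAS AND PROOFS =====

-- A's final if/elif chain, as a function (run_ups's tail)
def finChain (length u1 u2 u3 u4 : Int) : Int × Int × Int × Int :=
  if length == 1 then (u1 + 1, u2, u3, u4)
  else if length == 2 then (u1, u2 + 1, u3, u4)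
  else if length == 3 then (u1, u2, u3 + 1, u4)
  else (u1, u2, u3, u4 + 1)

-- proof-side spec: the stream of ascending-run lengths (Int)
def runsFrom (prev length : Int) : List Int → List Int
  | [] => [length]
  | u :: rest => if prev ≤ u then runsFrom u (length + 1) rest
                 else length :: runsFrom u 1 rest

-- the same stream with Nat lengths
def natRuns (prev : Int) (len : Nat) : List Int → List Nat
  | [] => [len]
  | u :: rest => if prev ≤ u then natRuns u (len + 1) rest
                 else len :: natRuns u 1 rest

-- bucketing one Int run length (A-side shape)
def bucketStep (c : List Int) (L : Int) : List Int :=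
  c.set (min L 4 - 1).toNat (c.getD (min L 4 - 1).toNat 0 + 1)

-- bucketing one Nat run length (B-side shape)
def bStep (c : List Int) (L : Nat) : List Int :=
  c.set (min L 4 - 1) (c.getD (min L 4 - 1) 0 + 1)

-- descent positions of t, the element at absolute index i preceded by prev
def descs (prev : Int) (i : Nat) : List Int → List Nat
  | [] => []
  | u :: rest => if prev ≤ u then descs u (i + 1) rest else i :: descs u (i + 1) rest

lemma bucketStep_eq (a b c d L : Int) (h : 1 ≤ L) :
    bucketStep [a, b, c, d] L =
      if L == 1 then [a + 1, b, c, d]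
      else if L == 2 then [a, b + 1, c, d]
      else if L == 3 then [a, b, c + 1, d]
      else [a, b, c, d + 1] := by
  by_cases h1 : L = 1
  · subst h1; simp [bucketStep]
  · by_cases h2 : L = 2
    · subst h2; simp [bucketStep]
    · by_cases h3 : L = 3
      · subst h3; simp [bucketStep]
      · have hm : min L 4 = 4 := by omega
        simp [bucketStep, hm, h1, h2, h3]

-- A's loop + final chain = fold of bucketStep over the run-length stream
lemma main_inv : ∀ (t : List Int) (prev length u1 u2 u3 u4 : Int), 1 ≤ length →
    (match run_ups_loop t (length, u1, u2, u3, u4, prev) with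
     | (l, a, b, c, d, _) => finChain l a b c d)
    = (let counts := (runsFrom prev length t).foldl bucketStep [u1, u2, u3, u4]
       (counts.getD 0 0, counts.getD 1 0, counts.getD 2 0, counts.getD 3 0)) := by
  intro t
  induction t with
  | nil =>
    intro prev length u1 u2 u3 u4 h
    simp only [run_ups_loop, runsFrom, List.foldl, bucketStep_eq _ _ _ _ _ h]
    by_cases h1 : length = 1
    · subst h1; simp [finChain]
    · by_cases h2 : length = 2
      · subst h2; simp [finChain]
      · by_cases h3 : length = 3
        · subst h3; simp [finChain]
        · simp [finChain, h1, h2, h3]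
  | cons u rest ih =>
    intro prev length u1 u2 u3 u4 h
    simp only [run_ups_loop, runsFrom]
    by_cases hle : prev ≤ u
    · simp only [if_pos hle]
      exact ih u (length + 1) u1 u2 u3 u4 (by omega)
    · simp only [if_neg hle, List.foldl, bucketStep_eq _ _ _ _ _ h]
      by_cases h1 : length = 1
      · subst h1; simpa using ih u 1 (u1 + 1) u2 u3 u4 (by omega)
      · by_cases h2 : length = 2
        · subst h2; simpa using ih u 1 u1 (u2 + 1) u3 u4 (by omega)
        · by_cases h3 : length = 3
          · subst h3; simpa using ih u 1 u1 u2 (u3 + 1) u4 (by omega)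
          · simpa [h1, h2, h3] using ih u 1 u1 u2 u3 (u4 + 1) (by omega)

-- pointwise: Int bucketing = Nat bucketing on positive lengths
lemma bucketStep_bStep (c : List Int) (L : Int) (h : 1 ≤ L) :
    bucketStep c L = bStep c L.toNat := by
  have : (min L 4 - 1).toNat = min L.toNat 4 - 1 := by omega
  simp [bucketStep, bStep, this]

lemma runsFrom_pos : ∀ (t : List Int) (prev len : Int), 1 ≤ len →
    ∀ L ∈ runsFrom prev len t, 1 ≤ L := by
  intro t
  induction t with
  | nil => intro prev len h L hL; simp [runsFrom] at hL; omega
  | cons u rest ih =>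
    intro prev len h L hL
    simp only [runsFrom] at hL
    split at hL
    · exact ih u (len + 1) (by omega) L hL
    · rcases List.mem_cons.mp hL with h1 | h1
      · omega
      · exact ih u 1 (by omega) L h1

lemma map_toNat_runsFrom : ∀ (t : List Int) (prev len : Int), 0 ≤ len →
    (runsFrom prev len t).map Int.toNat = natRuns prev len.toNat t := by
  intro t
  induction t with
  | nil => intro prev len _; simp [runsFrom, natRuns]
  | cons u rest ih =>
    intro prev len h
    simp only [runsFrom, natRuns]
    by_cases hle : prev ≤ u
    · simp only [if_pos hle]
      have := ih u (len + 1) (by omega)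
      rwa [show (len + 1).toNat = len.toNat + 1 by omega] at this
    · simp only [if_neg hle, List.map_cons]
      rw [ih u 1 (by omega)]
      rfl

lemma fold_bucket_toNat : ∀ (l : List Int) (init : List Int), (∀ L ∈ l, 1 ≤ L) →
    l.foldl bucketStep init = (l.map Int.toNat).foldl bStep init := by
  intro l
  induction l with
  | nil => intro init _; rfl
  | cons L rest ih =>
    intro init h
    simp only [List.map_cons, List.foldl]
    rw [bucketStep_bStep init L (h L (List.mem_cons_self ..))]
    exact ih _ (fun x hx => h x (List.mem_cons_of_mem _ hx))

-- B's start indices of h :: t are 0 followed by the descent positions of t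
lemma descs_filter : ∀ (t : List Int) (prev : Int) (i : Nat),
    descs prev i t =
      ((List.range t.length).filter
        (fun j => decide ((prev :: t).getD j 0 > (prev :: t).getD (j + 1) 0))).map (i + ·) := by
  intro t
  induction t with
  | nil => intro prev i; simp [descs]
  | cons u rest ih =>
    intro prev i
    have hrange : List.range (u :: rest).length = 0 :: (List.range rest.length).map Nat.succ := by
      simp [List.range_succ_eq_map]
    have hcomp : ((fun j => decide ((prev :: u :: rest).getD j 0 > (prev :: u :: rest).getD (j + 1) 0)) ∘ Nat.succ)
        = (fun j => decide ((u :: rest).getD j 0 > (u :: rest).getD (j + 1) 0)) := rfl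
    have hmm : (fun x => i + x) ∘ Nat.succ = (fun x => (i + 1) + x) := by
      funext x; simp [Function.comp]; omega
    simp only [descs]
    rw [hrange, List.filter_cons, List.filter_map, hcomp]
    by_cases hle : prev ≤ u
    · have h0 : decide ((prev :: u :: rest).getD 0 0 > (prev :: u :: rest).getD 1 0) = false := by
        simp [hle]
      rw [if_pos hle, h0]
      simp only [Bool.false_eq_true, if_false]
      rw [ih u (i + 1), List.map_map, hmm]
    · have h0 : decide ((prev :: u :: rest).getD 0 0 > (prev :: u :: rest).getD 1 0) = true := by
        simp; omega
      rw [if_neg hle, h0]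
      simp only [if_true, List.map_cons]
      rw [ih u (i + 1), List.map_map, hmm]
      simp

lemma bStarts_cons (h : Int) (t : List Int) :
    bStarts (h :: t) = 0 :: descs h 1 t := by
  have hrange : List.range (h :: t).length = 0 :: (List.range t.length).map Nat.succ := by
    simp [List.range_succ_eq_map]
  have hcomp : ((fun i => i == 0 || decide ((h :: t).getD (i - 1) 0 > (h :: t).getD i 0)) ∘ Nat.succ)
      = (fun j => decide ((h :: t).getD j 0 > (h :: t).getD (j + 1) 0)) := rfl
  have hmm : (fun x => 1 + x) = Nat.succ := by funext x; omega
  rw [bStarts, hrange, List.filter_cons]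
  simp only [beq_self_eq_true, Bool.true_or, if_true, List.filter_map, hcomp]
  rw [descs_filter t h 1, hmm]

-- zip-of-consecutive-starts diffs = the run-length stream
lemma zip_diff : ∀ (t : List Int) (prev : Int) (i s : Nat), s ≤ i →
    ((s :: descs prev i t).zip (descs prev i t ++ [i + t.length])).map (fun p => p.2 - p.1)
      = natRuns prev (i - s) t := by
  intro t
  induction t with
  | nil => intro prev i s _; simp [descs, natRuns]
  | cons u rest ih =>
    intro prev i s hs
    have hlen : i + (u :: rest).length = (i + 1) + rest.length := by simp; omega
    simp only [descs, natRuns, hlen]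
    by_cases hle : prev ≤ u
    · have e1 : i + 1 - s = (i - s) + 1 := by omega
      simp only [if_pos hle]
      rw [ih u (i + 1) s (by omega), e1]
    · have e2 : i + 1 - i = 1 := by omega
      simp only [if_neg hle, List.cons_append, List.zip_cons_cons, List.map_cons]
      rw [ih u (i + 1) i (by omega), e2]

theorem run_ups_spec : Claim_equal_run_ups := by
  intro seq _ hpre
  match seq with
  | [] => exact absurd rfl hpre
  | h :: t =>
    show run_ups (h :: t) = run_ups_alt (h :: t)
    have hfold : (runsFrom h 1 t).foldl bucketStep [0, 0, 0, 0]
        = ((bStarts (h :: t)).zip ((bStarts (h :: t)).tail ++ [(h :: t).length])).foldl bucketStepN [0, 0, 0, 0] := by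
      rw [fold_bucket_toNat _ _ (runsFrom_pos t h 1 (by omega)),
          map_toNat_runsFrom t h 1 (by omega), bStarts_cons]
      have h1 : (1 : Int).toNat = 1 - 0 := rfl
      rw [h1, ← zip_diff t h 1 0 (by omega), List.foldl_map]
      simp only [List.tail_cons, List.length_cons]
      have : t.length + 1 = 1 + t.length := by omega
      rw [this]
      rfl
    have hA := main_inv t h 1 0 0 0 0 (by omega)
    simp only [hfold] at hA
    simpa [run_ups, run_ups_alt, finChain] using hA
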